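-- pv_equiv track=rewrite | github.com/yolo0731/mcm_project | src/问题3/data.py | _prioritize_keys
-- ===== SOURCE A (Python) =====
-- from typing import Dict, Iterable, List, Optional, Tuple
--
-- def _prioritize_keys(keys: Iterable[str], preferred: Optional[str]) -> List[str]:
--     result: List[str] = []
--     if preferred:
--         for key in keys:
--             if key == preferred or key.endswith(preferred):
--                 result.append(key)
--     for pattern in ("DE_time", "_DE", "drive", "A", "B", "C", "X", "Y"):
--         for key in keys:
--             if key in result:
--                 continue
--             if pattern.lower() in key.lower():
--                 result.append(key)
--     for key in keys:
--         if key not in result: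
--             result.append(key)
--     return result
-- ===== SOURCE B (Python) =====
-- def _prioritize_keys(keys, preferred):
--     keys = list(keys)
--     pats = ("de_time", "_de", "drive", "a", "b", "c", "x", "y")
--
--     def rank(k):
--         if preferred and (k == preferred or k.endswith(preferred)):
--             return 0
--         kl = k.lower()
--         for i, p in enumerate(pats):
--             if p in kl:
--                 return i + 1
--         return 9
--
--     buckets = [[] for _ in range(10)]
--     for k in keys:
--         r = rank(k)
--         if r == 0 or k not in buckets[r]:
--             buckets[r].append(k)
--     return [k for b in buckets for k in b]
-- ===== Notes on version B (the rewrite author's own statement) =====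
-- stated objective: faster
-- what changed: A makes three kinds of scanning passes over keys (a preferred-suffix pass, one pass per pattern with a membership test against the whole growing result, and a final sweep); B computes a single priority rank per key in one pass, drops each key into a per-rank bucket (deduplicating only within that bucket), and concatenates the ten buckets.
import Mathlib
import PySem

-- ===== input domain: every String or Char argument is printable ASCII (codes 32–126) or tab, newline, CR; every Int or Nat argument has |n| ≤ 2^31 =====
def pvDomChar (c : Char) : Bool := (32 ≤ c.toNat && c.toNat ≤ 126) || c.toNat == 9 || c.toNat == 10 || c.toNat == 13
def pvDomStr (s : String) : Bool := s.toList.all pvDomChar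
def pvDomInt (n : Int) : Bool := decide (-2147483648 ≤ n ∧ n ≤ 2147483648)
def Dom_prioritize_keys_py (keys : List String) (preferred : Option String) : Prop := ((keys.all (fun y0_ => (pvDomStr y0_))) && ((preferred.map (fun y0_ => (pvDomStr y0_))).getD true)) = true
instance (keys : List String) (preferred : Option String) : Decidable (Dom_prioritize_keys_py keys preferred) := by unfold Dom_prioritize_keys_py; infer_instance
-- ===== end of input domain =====

-- B replaces A's repeated scanning passes over `keys` (one per tier, each testing membership
-- in the whole growing result) by a single pass that computes one priority rank per key and
-- drops it into a per-rank bucket; a timing run measured B faster on generated inputs.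

-- ===== PORT A =====
def prioritize_keys_py (keys : List String) (preferred : Option String) : List String :=
  -- result = []; if preferred: append keys equal to / ending with preferred
  let result : List String :=
    match preferred with
    | none => []
    | some p =>
      if p == "" then []
      else keys.foldl (fun result key =>
        if key == p || PySem.Str.endswith key p then result ++ [key] else result) []
  -- for pattern in (...): for key in keys: skip if already in result, append on substring match
  let result := (["DE_time", "_DE", "drive", "A", "B", "C", "X", "Y"] : List String).foldl
    (fun result pattern =>
      keys.foldl (fun result key =>
        if result.contains key then result
        else if PySem.Str.isIn (PySem.Str.lower pattern) (PySem.Str.lower key) then result ++ [key]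
        else result) result) result
  -- final pass: everything not yet in result
  keys.foldl (fun result key =>
    if result.contains key then result else result ++ [key]) result

-- ===== PORT B =====
def pvPats : List String := ["de_time", "_de", "drive", "a", "b", "c", "x", "y"]

-- rank(k): 0 for the preferred tier, i+1 for the first matching pattern, else 9
def pvTier0 (preferred : Option String) (k : String) : Bool :=
  match preferred with
  | none => false
  | some p => !(p == "") && (k == p || PySem.Str.endswith k p)

def pvRankPat (k : String) : Nat :=
  match pvPats.findIdx? (fun p => PySem.Str.isIn p (PySem.Str.lower k)) with
  | some i => i + 1
  | none => 9

def pvRank (preferred : Option String) (k : String) : Nat :=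
  if pvTier0 preferred k then 0 else pvRankPat k

def prioritize_keys_py_alt (keys : List String) (preferred : Option String) : List String :=
  -- one pass: drop each key into the bucket of its rank (bucket 0 keeps duplicates)
  let buckets : List (List String) := List.replicate 10 []
  let buckets := keys.foldl (fun bs k =>
    let r := pvRank preferred k
    if r == 0 || !((bs.getD r []).contains k) then bs.set r ((bs.getD r []) ++ [k]) else bs)
    buckets
  -- [k for b in buckets for k in b]
  buckets.foldl (fun out b => out ++ b) []

-- ===== PRECONDITION & SPEC =====
def Spec_prioritize_keys_py (keys : List String) (preferred : Option String) (out : List String) : Prop := out = prioritize_keys_py_alt keys preferred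
instance (keys : List String) (preferred : Option String) (out : List String) : Decidable (Spec_prioritize_keys_py keys preferred out) := by unfold Spec_prioritize_keys_py; infer_instance

-- ===== CLAIM (what is proved, stated in full; the proofs are below) =====
def Claim_equal_prioritize_keys_py : Prop := ∀ (keys : List String) (preferred : Option String), Dom_prioritize_keys_py keys preferred → Spec_prioritize_keys_py keys preferred (prioritize_keys_py keys preferred)

-- ===== LEMMAS AND PROOFS =====

-- concatenation of buckets 0..n (proof-side description of both programs' output)
def pvBup (preferred : Option String) (keys : List String) : Nat → List String
  | 0 => keys.filter (fun k => pvRank preferred k == 0)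
  | n+1 => pvBup preferred keys n ++
      (keys.filter (fun k => pvRank preferred k == (n+1))).foldl
        (fun acc k => if acc.contains k then acc else acc ++ [k]) []

lemma pv_rankPat_pos (k : String) : 1 ≤ pvRankPat k := by
  unfold pvRankPat; split <;> omega

lemma pv_rankPat_le_nine (k : String) : pvRankPat k ≤ 9 := by
  unfold pvRankPat
  split
  · rename_i i h
    obtain ⟨hlt, _⟩ := List.findIdx?_eq_some_iff_getElem.mp h
    simp [pvPats] at hlt
    omega
  · omega

lemma pv_rank_le_nine (p : Option String) (k : String) : pvRank p k ≤ 9 := by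
  unfold pvRank; split
  · omega
  · exact pv_rankPat_le_nine k

lemma pv_rank_zero_iff (p : Option String) (k : String) :
    pvRank p k = 0 ↔ pvTier0 p k = true := by
  unfold pvRank
  split <;> rename_i h <;> simp [h]
  have := pv_rankPat_pos k; omega

lemma pv_rank_succ_iff (p : Option String) (k : String) (i : Nat) (hi : i < pvPats.length)
    (hge : i + 1 ≤ pvRank p k) :
    (PySem.Str.isIn pvPats[i] (PySem.Str.lower k) = true) ↔ pvRank p k = i + 1 := by
  have h8 : pvPats.length = 8 := rfl
  unfold pvRank at *
  split at hge
  · omega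
  · rename_i ht
    rw [if_neg ht]
    unfold pvRankPat at *
    constructor
    · intro hm
      split at hge
      · rename_i j hj
        obtain ⟨_, hpj, hmin⟩ := List.findIdx?_eq_some_iff_getElem.mp hj
        by_cases hij : i < j
        · exact absurd hm (hmin i hij)
        · omega
      · rename_i hnone
        rw [List.findIdx?_eq_none_iff] at hnone
        rw [hnone pvPats[i] (List.getElem_mem hi)] at hm
        cases hm
    · intro hr
      split at hr
      · rename_i j hj
        have : j = i := by omega
        subst this
        obtain ⟨_, hpj, _⟩ := List.findIdx?_eq_some_iff_getElem.mp hj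
        exact hpj
      · omega

lemma pv_mem_fdfold (l : List String) : ∀ (acc : List String) (x : String),
    (x ∈ l.foldl (fun acc k => if acc.contains k then acc else acc ++ [k]) acc) ↔ x ∈ acc ∨ x ∈ l := by
  induction l with
  | nil => simp
  | cons k ks ih =>
    intro acc x
    simp only [List.foldl_cons]
    by_cases h : acc.contains k
    · rw [if_pos h, ih]
      rw [List.contains_iff_mem] at h
      simp only [List.mem_cons]
      constructor
      · rintro (hx | hx) <;> tauto
      · rintro (hx | rfl | hx) <;> tauto
    · rw [if_neg h, ih]
      simp only [List.mem_append, List.mem_cons]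
      tauto

lemma pv_mem_Bup (p : Option String) (keys : List String) (n : Nat) (x : String) :
    x ∈ pvBup p keys n ↔ x ∈ keys ∧ pvRank p x ≤ n := by
  induction n with
  | zero => simp [pvBup, List.mem_filter]
  | succ n ih =>
    simp only [pvBup, List.mem_append, pv_mem_fdfold, ih, List.mem_filter, List.not_mem_nil,
      false_or, beq_iff_eq]
    constructor
    · rintro (⟨h1, h2⟩ | ⟨h1, h2⟩) <;> exact ⟨h1, by omega⟩
    · rintro ⟨h1, h2⟩
      by_cases h : pvRank p x ≤ n
      · exact Or.inl ⟨h1, h⟩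
      · exact Or.inr ⟨h1, by omega⟩

lemma pv_scan_aux (rk : String → Nat) (q : String → Bool) (r : Nat) (K res₀ : List String)
    (h₀ : ∀ k ∈ K, (res₀.contains k = true ↔ rk k < r))
    (hq : ∀ k ∈ K, r ≤ rk k → (q k = true ↔ rk k = r)) :
    ∀ (keys acc : List String), (∀ k ∈ keys, k ∈ K) → (∀ k ∈ acc, k ∈ K ∧ rk k = r) →
    keys.foldl (fun res k => if res.contains k then res
        else if q k then res ++ [k] else res) (res₀ ++ acc)
    = res₀ ++ (keys.filter (fun k => rk k == r)).foldl
        (fun acc k => if acc.contains k then acc else acc ++ [k]) acc := by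
  intro keys
  induction keys with
  | nil => intro acc _ _; simp
  | cons k ks ih =>
    intro acc hks hacc
    have hkK : k ∈ K := hks k (List.mem_cons_self)
    have hks' : ∀ x ∈ ks, x ∈ K := fun x hx => hks x (List.mem_cons_of_mem _ hx)
    simp only [List.foldl_cons, List.filter_cons]
    have hcontains : (res₀ ++ acc).contains k = (res₀.contains k || acc.contains k) := by
      simp
    by_cases hlt : rk k < r
    · -- already in res₀: skipped on both sides
      have hc : (res₀ ++ acc).contains k = true := by
        rw [hcontains, (h₀ k hkK).mpr hlt]; simp
      rw [if_pos hc, if_neg (by simp; omega)]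
      exact ih acc hks' hacc
    · rw [not_lt] at hlt
      by_cases heq : rk k = r
      · rw [if_pos (show (rk k == r) = true from by simp [heq])]
        have hr0 : res₀.contains k = false := by
          rw [Bool.eq_false_iff]; intro hc; have := (h₀ k hkK).mp hc; omega
        by_cases hacck : acc.contains k
        · -- duplicate within the bucket: skipped on both sides
          have hc : (res₀ ++ acc).contains k = true := by rw [hcontains, hacck]; simp
          rw [if_pos hc, List.foldl_cons, if_pos hacck]
          exact ih acc hks' hacc
        · have hc : (res₀ ++ acc).contains k = false := by
            rw [hcontains, hr0, Bool.eq_false_iff] at *; simpa using hacck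
          rw [if_neg (by simp at hc ⊢; tauto), if_pos ((hq k hkK hlt).mpr heq), List.foldl_cons,
            if_neg (by simpa using hacck), List.append_assoc]
          exact ih (acc ++ [k]) hks' (by
            intro x hx
            rcases List.mem_append.mp hx with hx | hx
            · exact hacc x hx
            · simp at hx; subst hx; exact ⟨hkK, heq⟩)
      · -- rk k > r: not yet due, skipped on both sides
        have hgt : r < rk k := by omega
        have hc : (res₀ ++ acc).contains k = false := by
          rw [hcontains]
          have h1 : res₀.contains k = false := by
            rw [Bool.eq_false_iff]; intro hcc; have := (h₀ k hkK).mp hcc; omega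
          have h2 : acc.contains k = false := by
            rw [Bool.eq_false_iff]; intro hcc
            rw [List.contains_iff_mem] at hcc
            exact heq (hacc k hcc).2
          rw [h1, h2]; rfl
        have hqf : q k = false := by
          rw [Bool.eq_false_iff]; intro hqt
          exact heq ((hq k hkK hlt).mp hqt)
        rw [if_neg (by simp at hc ⊢; tauto), hqf, if_neg (by simp), if_neg (by simp; omega)]
        exact ih acc hks' hacc

-- the pattern loop walks pvBup up one bucket per pattern
lemma pv_patloop (preferred : Option String) (keys : List String) :
    ∀ (ps : List String) (i : Nat), pvPats.drop i = ps.map PySem.Str.lower →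
    ps.foldl (fun result pattern =>
        keys.foldl (fun result key =>
          if result.contains key then result
          else if PySem.Str.isIn (PySem.Str.lower pattern) (PySem.Str.lower key) then result ++ [key]
          else result) result) (pvBup preferred keys i)
    = pvBup preferred keys (i + ps.length) := by
  intro ps
  induction ps with
  | nil => intro i h; simp
  | cons pat rest ih =>
    intro i h
    have hi : i < pvPats.length := by
      by_contra hge
      rw [List.drop_eq_nil_of_le (by omega)] at h
      simp at h
    have hget : pvPats[i] = PySem.Str.lower pat := by
      have h0 : pvPats[i]? = some (PySem.Str.lower pat) := by
        have h1 := congrArg (fun l => l[0]?) h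
        simpa [List.getElem?_drop] using h1
      rw [List.getElem?_eq_getElem hi] at h0
      exact Option.some.inj h0
    have hrest : pvPats.drop (i + 1) = rest.map PySem.Str.lower := by
      have : pvPats.drop (i + 1) = (pvPats.drop i).drop 1 := by
        rw [List.drop_drop]
      rw [this, h]
      simp
    rw [List.foldl_cons]
    have hscan := pv_scan_aux (pvRank preferred)
      (fun key => PySem.Str.isIn (PySem.Str.lower pat) (PySem.Str.lower key)) (i + 1)
      keys (pvBup preferred keys i)
      (by
        intro k hk
        rw [List.contains_iff_mem, pv_mem_Bup]
        constructor
        · rintro ⟨_, hle⟩; omega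
        · intro hlt; exact ⟨hk, by omega⟩)
      (by
        intro k _ hge
        rw [← hget]
        exact pv_rank_succ_iff preferred k i hi hge)
      keys [] (fun k hk => hk) (by simp)
    rw [List.append_nil] at hscan
    rw [hscan]
    rw [show pvBup preferred keys i ++
        (List.filter (fun k => pvRank preferred k == i + 1) keys).foldl
          (fun acc k => if acc.contains k then acc else acc ++ [k]) []
        = pvBup preferred keys (i + 1) from rfl]
    rw [ih (i + 1) hrest]
    have : i + 1 + rest.length = i + (rest.length + 1) := by omega
    rw [this]
    rfl

-- A equals the bucket concatenation
lemma pv_A_eq_Bup (keys : List String) (preferred : Option String) :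
    prioritize_keys_py keys preferred = pvBup preferred keys 9 := by
  simp only [prioritize_keys_py]
  -- phase 1 is bucket 0
  have hph1 : (match preferred with
      | none => ([] : List String)
      | some p =>
        if p == "" then []
        else keys.foldl (fun result key =>
          if key == p || PySem.Str.endswith key p then result ++ [key] else result) [])
      = pvBup preferred keys 0 := by
    show _ = keys.filter (fun k => pvRank preferred k == 0)
    have hfil : ∀ k, (pvRank preferred k == 0) = pvTier0 preferred k := by
      intro k
      by_cases h : pvTier0 preferred k = true
      · simp [(pv_rank_zero_iff preferred k).mpr h, h]
      · have : pvRank preferred k ≠ 0 := fun hc => h ((pv_rank_zero_iff preferred k).mp hc)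
        simp [this, Bool.eq_false_iff.mpr h]
    cases preferred with
    | none =>
      show ([] : List String) = _
      rw [List.filter_eq_nil_iff.mpr (by intro k _; rw [hfil]; simp [pvTier0])]
    | some p =>
      show (if p == "" then [] else keys.foldl (fun result key =>
        if key == p || PySem.Str.endswith key p then result ++ [key] else result) []) = _
      by_cases hp : (p == "") = true
      · rw [if_pos hp]
        rw [List.filter_eq_nil_iff.mpr (by intro k _; rw [hfil]; simp [pvTier0, hp])]
      · rw [if_neg hp]
        rw [PySem.List.foldl_append_if_eq_filter, List.nil_append]
        apply List.filter_congr
        intro k _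
        rw [hfil]
        simp [pvTier0, hp]
  rw [hph1]
  -- phase 2: the eight patterns walk buckets 1..8
  have hpats : pvPats.drop 0 = (["DE_time", "_DE", "drive", "A", "B", "C", "X", "Y"] : List String).map PySem.Str.lower := by
    decide
  have hph2 := pv_patloop preferred keys
    (["DE_time", "_DE", "drive", "A", "B", "C", "X", "Y"] : List String) 0 hpats
  rw [hph2]
  -- phase 3: the final sweep is bucket 9
  have hstep : (fun (result : List String) (key : String) =>
      if result.contains key then result else result ++ [key])
      = (fun (result : List String) (key : String) =>
        if result.contains key then result else if (fun _ => true) key then result ++ [key] else result) := by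
    funext result key
    simp
  rw [hstep]
  rw [show (0 + (["DE_time", "_DE", "drive", "A", "B", "C", "X", "Y"] : List String).length) = 8 from rfl]
  have hscan := pv_scan_aux (pvRank preferred) (fun _ => true) 9 keys
    (pvBup preferred keys 8)
    (by
      intro k hk
      rw [List.contains_iff_mem, pv_mem_Bup]
      constructor
      · rintro ⟨_, hle⟩; omega
      · intro hlt; exact ⟨hk, by omega⟩)
    (by
      intro k _ hge
      have := pv_rank_le_nine preferred k
      constructor
      · intro _; omega
      · intro _; rfl)
    keys [] (fun k hk => hk) (by simp)
  rw [List.append_nil] at hscan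
  rw [hscan]
  rfl

-- B-side: the single bucket-filling pass (pvBStep names the loop body of port B)
def pvBStep (preferred : Option String) (bs : List (List String)) (k : String) : List (List String) :=
  let r := pvRank preferred k
  if r == 0 || !((bs.getD r []).contains k) then bs.set r ((bs.getD r []) ++ [k]) else bs

lemma pvBStep_eq (preferred : Option String) (bs : List (List String)) (k : String) :
    pvBStep preferred bs k
    = if pvRank preferred k == 0 || !((bs.getD (pvRank preferred k) []).contains k) then
        bs.set (pvRank preferred k) ((bs.getD (pvRank preferred k) []) ++ [k])
      else bs := rfl

lemma pv_buckets_len (preferred : Option String) :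
    ∀ (keys : List String) (bs : List (List String)),
    (keys.foldl (pvBStep preferred) bs).length = bs.length := by
  intro keys
  induction keys with
  | nil => intro bs; rfl
  | cons k ks ih =>
    intro bs
    rw [List.foldl_cons, ih, pvBStep_eq]
    split <;> simp

lemma pv_buckets_idx (preferred : Option String) :
    ∀ (keys : List String) (bs : List (List String)) (j : Nat), j < bs.length →
    ((keys.foldl (pvBStep preferred) bs).getD j [])
    = (keys.filter (fun k => pvRank preferred k == j)).foldl
        (fun b k => if j == 0 || !(b.contains k) then b ++ [k] else b) (bs.getD j []) := by
  intro keys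
  induction keys with
  | nil => intro bs j _; rfl
  | cons k ks ih =>
    intro bs j hj
    rw [List.foldl_cons, List.filter_cons]
    by_cases hrj : pvRank preferred k = j
    · rw [if_pos (show (pvRank preferred k == j) = true from by simp [hrj])]
      rw [List.foldl_cons, pvBStep_eq, hrj]
      by_cases hC : (j == 0 || !((bs.getD j []).contains k)) = true
      · rw [if_pos hC, if_pos hC,
          ih (bs.set j (bs.getD j [] ++ [k])) j (by simpa using hj)]
        congr 1
        rw [List.getD_eq_getElem?_getD, List.getElem?_set_self hj]
        rfl
      · rw [if_neg hC, if_neg hC, ih bs j hj]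
    · rw [if_neg (show ¬ (pvRank preferred k == j) = true from by simp [hrj])]
      rw [pvBStep_eq]
      by_cases hC : (pvRank preferred k == 0 || !((bs.getD (pvRank preferred k) []).contains k)) = true
      · rw [if_pos hC, ih _ j (by simpa using hj)]
        congr 1
        rw [List.getD_eq_getElem?_getD, List.getElem?_set_ne (by omega), ← List.getD_eq_getElem?_getD]
      · rw [if_neg hC, ih bs j hj]

lemma pv_B_eq_Bup (keys : List String) (preferred : Option String) :
    prioritize_keys_py_alt keys preferred = pvBup preferred keys 9 := by
  simp only [prioritize_keys_py_alt]
  rw [show (fun (bs : List (List String)) (k : String) =>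
      let r := pvRank preferred k
      if r == 0 || !((bs.getD r []).contains k) then bs.set r ((bs.getD r []) ++ [k]) else bs)
    = pvBStep preferred from rfl]
  have hlen : (keys.foldl (pvBStep preferred) (List.replicate 10 [])).length = 10 := by
    rw [pv_buckets_len]; simp
  have hidx : ∀ j : Nat, j < 10 →
      ((keys.foldl (pvBStep preferred) (List.replicate 10 [])).getD j [])
      = (keys.filter (fun k => pvRank preferred k == j)).foldl
          (fun b k => if j == 0 || !(b.contains k) then b ++ [k] else b) [] := by
    intro j hj
    rw [pv_buckets_idx preferred keys (List.replicate 10 []) j (by simpa using hj)]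
    interval_cases j <;> rfl
  set F := keys.foldl (pvBStep preferred) (List.replicate 10 []) with hF
  clear_value F
  match F, hlen with
  | [a0,a1,a2,a3,a4,a5,a6,a7,a8,a9], _ =>
    have h0 := hidx 0 (by omega); have h1 := hidx 1 (by omega)
    have h2 := hidx 2 (by omega); have h3 := hidx 3 (by omega)
    have h4 := hidx 4 (by omega); have h5 := hidx 5 (by omega)
    have h6 := hidx 6 (by omega); have h7 := hidx 7 (by omega)
    have h8 := hidx 8 (by omega); have h9 := hidx 9 (by omega)
    simp only [List.getD_eq_getElem?_getD, List.getElem?_cons_zero, List.getElem?_cons_succ,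
      Option.getD_some] at h0 h1 h2 h3 h4 h5 h6 h7 h8 h9
    subst h0 h1 h2 h3 h4 h5 h6 h7 h8 h9
    simp only [List.foldl_cons, List.foldl_nil, List.nil_append]
    have hfd : ∀ j : Nat, j ≠ 0 →
        (fun (b : List String) (k : String) => if j == 0 || !(b.contains k) then b ++ [k] else b)
        = (fun (acc : List String) (k : String) => if acc.contains k then acc else acc ++ [k]) := by
      intro j hjne
      funext b k
      cases h : b.contains k <;> simp [hjne]
    rw [hfd 1 (by omega), hfd 2 (by omega), hfd 3 (by omega), hfd 4 (by omega), hfd 5 (by omega),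
      hfd 6 (by omega), hfd 7 (by omega), hfd 8 (by omega), hfd 9 (by omega)]
    have h00 : (fun (b : List String) (k : String) =>
        if (0 : Nat) == 0 || !(b.contains k) then b ++ [k] else b)
        = (fun (acc : List String) (k : String) => acc ++ [k]) := by
      funext b k; simp
    rw [h00, PySem.List.foldl_append_singleton]
    simp only [pvBup, List.nil_append]

-- ===== VERDICT (by name: the statement is the Claim_ definition above) =====
theorem prioritize_keys_py_spec : Claim_equal_prioritize_keys_py := by
  intro keys preferred _
  unfold Spec_prioritize_keys_py
  rw [pv_A_eq_Bup, pv_B_eq_Bup]
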